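-- pv_equiv track=rewrite | github.com/iamsaito0129-web/AI-Company | パズル解決プロジェクト/check_path.py | generate_mapping
-- ===== SOURCE A (Python) =====
-- def generate_mapping(w, h, d):
--     face_mapping = {}
--     id_counter = 1
--     for x in range(w):
--         for y in range(h):
--             for z in range(d):
--                 is_outer = (x == 0 or x == w - 1 or y == 0 or y == h - 1 or z == 0 or z == d - 1)
--                 if is_outer:
--                     for i in range(6):
--                         is_out = (i == 0 and x == w - 1) or (i == 1 and x == 0) or (i == 2 and y == h - 1) or (i == 3 and y == 0) or (i == 4 and z == d - 1) or (i == 5 and z == 0)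
--                         if is_out:
--                             face_mapping[id_counter] = (x, y, z, i)
--                             id_counter += 1
--     return face_mapping
-- ===== SOURCE B (Python) =====
-- def generate_mapping(w, h, d):
--     mapping = {}
--     cid = 1
--     for x in range(w):
--         x_edge = (x == 0 or x == w - 1)
--         for y in range(h):
--             if x_edge or y == 0 or y == h - 1:
--                 zs = range(d)          # boundary column: every z is a surface cell
--             else:
--                 zs = (0, d - 1) if d > 1 else range(d)   # interior column: only the two z ends
--             for z in zs:
--                 faces = []
--                 if x == w - 1: faces.append(0)
--                 if x == 0: faces.append(1)
--                 if y == h - 1: faces.append(2)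
--                 if y == 0: faces.append(3)
--                 if z == d - 1: faces.append(4)
--                 if z == 0: faces.append(5)
--                 for i in faces:
--                     mapping[cid] = (x, y, z, i)
--                     cid += 1
--     return mapping
-- ===== Notes on version B (the rewrite author's own statement) =====
-- stated objective: faster
-- what changed: B visits only surface cells (for interior (x,y) columns it touches just z=0 and z=d-1, skipping the interior z-range) and builds each cell's face list directly instead of testing all six faces of every cell of the full w*h*d grid.
import Mathlib
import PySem

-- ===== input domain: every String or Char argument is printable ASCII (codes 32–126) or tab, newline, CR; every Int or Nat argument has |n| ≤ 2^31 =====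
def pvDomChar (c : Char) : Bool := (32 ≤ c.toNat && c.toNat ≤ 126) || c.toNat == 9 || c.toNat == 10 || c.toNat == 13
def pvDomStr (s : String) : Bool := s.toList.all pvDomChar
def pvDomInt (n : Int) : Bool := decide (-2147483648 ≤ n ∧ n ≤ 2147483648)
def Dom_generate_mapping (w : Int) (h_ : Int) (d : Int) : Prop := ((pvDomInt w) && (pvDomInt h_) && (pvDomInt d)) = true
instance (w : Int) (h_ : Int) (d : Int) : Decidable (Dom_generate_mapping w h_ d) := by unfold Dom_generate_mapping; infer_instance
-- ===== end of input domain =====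

-- B iterates only the cube's surface cells (for interior (x,y) columns it visits just z = 0 and
-- z = d-1, skipping the interior z-range) and builds each cell's face list directly; proved to
-- return exactly A's id -> (x, y, z, face) association list.


-- ===== PORT A =====
def generate_mapping (w : Int) (h_ : Int) (d : Int) : List (Int × List Int) :=
  ((PySem.List.pyRange 0 w 1).foldl (fun st x =>
    (PySem.List.pyRange 0 h_ 1).foldl (fun st y =>
      (PySem.List.pyRange 0 d 1).foldl (fun st z =>
        if x == 0 || x == w - 1 || y == 0 || y == h_ - 1 || z == 0 || z == d - 1 then
          (PySem.List.pyRange 0 6 1).foldl (fun st i =>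
            if (i == 0 && x == w - 1) || (i == 1 && x == 0) || (i == 2 && y == h_ - 1) ||
               (i == 3 && y == 0) || (i == 4 && z == d - 1) || (i == 5 && z == 0) then
              (st.1.insert st.2 [x, y, z, i], st.2 + 1)
            else st) st
        else st) st) st)
    ((PySem.Dict.empty : PySem.Dict Int (List Int)), (1 : Int))).1.items

-- ===== PORT B =====
-- face list of one surface cell, in Python face-id order (B's six if/append's)
def altFaces (w h_ d x y z : Int) : List Int :=
  (if x == w - 1 then [(0 : Int)] else []) ++ (if x == 0 then [(1 : Int)] else []) ++
  (if y == h_ - 1 then [(2 : Int)] else []) ++ (if y == 0 then [(3 : Int)] else []) ++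
  (if z == d - 1 then [(4 : Int)] else []) ++ (if z == 0 then [(5 : Int)] else [])

-- B's innermost loop: record each face under the next fresh id
def altEmit (x y z : Int) (st : PySem.Dict Int (List Int) × Int) (fs : List Int) :
    PySem.Dict Int (List Int) × Int :=
  fs.foldl (fun st i => (st.1.insert st.2 [x, y, z, i], st.2 + 1)) st

def generate_mapping_alt (w : Int) (h_ : Int) (d : Int) : List (Int × List Int) :=
  ((PySem.List.pyRange 0 w 1).foldl (fun st x =>
    (PySem.List.pyRange 0 h_ 1).foldl (fun st y =>
      (if x == 0 || x == w - 1 || y == 0 || y == h_ - 1 then PySem.List.pyRange 0 d 1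
       else if d > 1 then [0, d - 1] else PySem.List.pyRange 0 d 1).foldl
        (fun st z => altEmit x y z st (altFaces w h_ d x y z)) st) st)
    ((PySem.Dict.empty : PySem.Dict Int (List Int)), (1 : Int))).1.items

-- ===== PRECONDITION & SPEC =====
def Spec_generate_mapping (w : Int) (h_ : Int) (d : Int) (out : List (Int × List Int)) : Prop := out = generate_mapping_alt w h_ d
instance (w : Int) (h_ : Int) (d : Int) (out : List (Int × List Int)) : Decidable (Spec_generate_mapping w h_ d out) := by unfold Spec_generate_mapping; infer_instance

-- ===== CLAIM (what is proved, stated in full; the proofs are below) =====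
def Claim_equal_generate_mapping : Prop := ∀ (w : Int) (h_ : Int) (d : Int), Dom_generate_mapping w h_ d → Spec_generate_mapping w h_ d (generate_mapping w h_ d)

-- ===== LEMMAS AND PROOFS =====

-- a guarded-insert fold over (condition, face) pairs is one emission of the selected faces
theorem fold_emit (x y z : Int) (ps : List (Bool × Int)) (st : PySem.Dict Int (List Int) × Int) :
    ps.foldl (fun st p => if p.1 then (st.1.insert st.2 [x, y, z, p.2], st.2 + 1) else st) st
      = altEmit x y z st (ps.foldr (fun p acc => (if p.1 then [p.2] else []) ++ acc) []) := by
  induction ps generalizing st with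
  | nil => rfl
  | cons p rest ih =>
    obtain ⟨b, a⟩ := p
    cases b <;> simp [List.foldl_cons, List.foldr_cons, ih, altEmit]

-- A's per-cell work (face scan i = 0..5 under the is_outer guard) equals B's direct emission
theorem cellA_eq (w h_ d x y z : Int) (st : PySem.Dict Int (List Int) × Int) :
    (if x == 0 || x == w - 1 || y == 0 || y == h_ - 1 || z == 0 || z == d - 1 then
      (PySem.List.pyRange 0 6 1).foldl (fun st i =>
        if (i == 0 && x == w - 1) || (i == 1 && x == 0) || (i == 2 && y == h_ - 1) ||
           (i == 3 && y == 0) || (i == 4 && z == d - 1) || (i == 5 && z == 0) then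
          (st.1.insert st.2 [x, y, z, i], st.2 + 1)
        else st) st
    else st) = altEmit x y z st (altFaces w h_ d x y z) := by
  have h6 : PySem.List.pyRange 0 6 1 = [0, 1, 2, 3, 4, 5] := by decide
  by_cases ho : (x == 0 || x == w - 1 || y == 0 || y == h_ - 1 || z == 0 || z == d - 1) = true
  · rw [if_pos ho, h6]
    have e : ([(0 : Int), 1, 2, 3, 4, 5].foldl (fun st i =>
        if (i == 0 && x == w - 1) || (i == 1 && x == 0) || (i == 2 && y == h_ - 1) ||
           (i == 3 && y == 0) || (i == 4 && z == d - 1) || (i == 5 && z == 0) then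
          (st.1.insert st.2 [x, y, z, i], st.2 + 1)
        else st) st)
        = (([(0 : Int), 1, 2, 3, 4, 5].map (fun i => ((i == 0 && x == w - 1) || (i == 1 && x == 0) ||
            (i == 2 && y == h_ - 1) || (i == 3 && y == 0) || (i == 4 && z == d - 1) ||
            (i == 5 && z == 0), i))).foldl
            (fun st p => if p.1 then (st.1.insert st.2 [x, y, z, p.2], st.2 + 1) else st) st) :=
      (List.foldl_map
        (f := fun i => ((i == 0 && x == w - 1) || (i == 1 && x == 0) || (i == 2 && y == h_ - 1) ||
          (i == 3 && y == 0) || (i == 4 && z == d - 1) || (i == 5 && z == 0), i))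
        (g := fun st p => if p.1 then (st.1.insert st.2 [x, y, z, p.2], st.2 + 1) else st)
        (l := [(0 : Int), 1, 2, 3, 4, 5]) (init := st)).symm
    rw [e, fold_emit]
    congr 1
    simp [altFaces]
  · rw [if_neg ho]
    simp only [Bool.or_eq_true, beq_iff_eq, not_or] at ho
    obtain ⟨⟨⟨⟨⟨a, b⟩, c⟩, d'⟩, e⟩, f⟩ := ho
    simp [altFaces, altEmit, a, b, c, d', e, f]

-- interior cells emit nothing
theorem altFaces_interior (w h_ d x y z : Int) (hx0 : x ≠ 0) (hx1 : x ≠ w - 1)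
    (hy0 : y ≠ 0) (hy1 : y ≠ h_ - 1) (hz0 : z ≠ 0) (hz1 : z ≠ d - 1) :
    altFaces w h_ d x y z = [] := by
  simp [altFaces, beq_iff_eq, hx0, hx1, hy0, hy1, hz0, hz1]

-- skipping the interior z-range is sound for an interior (x, y) column
theorem zfold_eq (w h_ d x y : Int) (hx0 : x ≠ 0) (hx1 : x ≠ w - 1)
    (hy0 : y ≠ 0) (hy1 : y ≠ h_ - 1) (hd : d > 1) (st : PySem.Dict Int (List Int) × Int) :
    (PySem.List.pyRange 0 d 1).foldl (fun st z => altEmit x y z st (altFaces w h_ d x y z)) st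
      = [0, d - 1].foldl (fun st z => altEmit x y z st (altFaces w h_ d x y z)) st := by
  have hcons := PySem.List.pyRange_one_cons (a := 0) (b := d) (by omega)
  have hsplit : PySem.List.pyRange 1 d 1
      = PySem.List.pyRange 1 (d - 1) 1 ++ [d - 1] := by
    have := PySem.List.pyRange_one_succ_right (a := 1) (b := d - 1) (by omega)
    rw [show d - 1 + 1 = d by omega] at this
    exact this
  rw [hcons, show ((0 : Int) + 1) = 1 by norm_num, hsplit]
  simp only [List.foldl_cons, List.foldl_append]
  congr 1
  rw [PySem.List.foldl_congr_mem _ _ (fun st _ => st) _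
    (by
      intro acc zz hz
      have hzz := (PySem.List.mem_pyRange_one).1 hz
      rw [altFaces_interior w h_ d x y zz hx0 hx1 hy0 hy1 (by omega) (by omega)]
      rfl)]
  induction PySem.List.pyRange 1 (d - 1) 1 with
  | nil => rfl
  | cons a l ih => exact ih

theorem generate_mapping_spec : Claim_equal_generate_mapping := by
  intro w h_ d _
  unfold Spec_generate_mapping generate_mapping generate_mapping_alt
  refine congrArg (fun st : PySem.Dict Int (List Int) × Int => st.1.items) ?_
  apply PySem.List.foldl_congr_mem
  intro st x _
  apply PySem.List.foldl_congr_mem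
  intro st' y _
  rw [PySem.List.foldl_congr_mem _ _ (fun st z => altEmit x y z st (altFaces w h_ d x y z)) _
    (fun acc zz _ => cellA_eq w h_ d x y zz acc)]
  by_cases hb : (x == 0 || x == w - 1 || y == 0 || y == h_ - 1) = true
  · rw [if_pos hb]
  · rw [if_neg hb]
    simp only [Bool.or_eq_true, beq_iff_eq, not_or] at hb
    obtain ⟨⟨⟨hx0, hx1⟩, hy0⟩, hy1⟩ := hb
    by_cases hd : d > 1
    · rw [if_pos hd]
      exact zfold_eq w h_ d x y hx0 hx1 hy0 hy1 hd st'
    · rw [if_neg hd]
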